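/- GENERATED by mk_final_copies.py from the proof of the farm's unit `start_decoder.C6e` (farm:start_decoder.C6e.1: Lemmas.lean) as the
   re-elaboration sweep compiled it — do not edit. -/
/-
  LEMMAS of unit start_decoder.C6e: the carry lemmas of farm/hints/start_decoder.C6.head-start.lean (the farm worker of start_decoder.C6,
  attempt 1) that segment C6e needs, renamed with the prefix `c6e_`: `SDw`, `BookTrans`, `Frame` and CUR(i) over ONE `Mem.SameExcept`
  whose windows are `c6e_SpanOK` — the own stack, the struct `cb(i)`, `[f + 8, f + 20)` (INCLUDING `setup_temp_memory_required`
  `[f + 16, f + 20)`, the store 0x1146ce of the `size` statistic, which is not a window of the tree's `Frame.step` / `Cur.step`),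
  `[f + 140, f + 144)` —, and `c6e_carry`, which packs them for an exit of the segment.
-/
import Asan.CheckWalk
import Vorbis.Spec.StartDecoderATest
import Vorbis.Spec.Units.start_decoder_C6e
open X86 X86.User Asan Vorbis Vorbis.Spec Vorbis.Spec.StartDecoder

set_option maxRecDepth 4000
set_option maxHeartbeats 4000000

namespace Vorbis.Spec.start_decoder_C6e

/-- The windows of `*f` that NO path of segment `C6` (and no callee of it) writes: everything but `setup_memory_required`
`[8, 12)` (setup_malloc), `setup_temp_memory_required` `[16, 20)` (the `size` statistic), `setup_offset` / `temp_offset`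
`[128, 136)` (the allocators) and `error` `[140, 144)` (error). Every clause of `SDw … 3` but the arena layer reads inside them. -/
def c6e_keepWins : Wins := [(0, 8), (20, 128), (144, 1808)]

/-- **`SDw len 3` OVER A CHANGE OF MEMORY, ARENA GHOST, BLOCK PREDICATE AND LIVE SET** (what every segment `C2 … C15` needs after each
store and each callee, and what Vorbis/Spec/StartDecoderA.lean does not provide): the windows `c6e_keepWins` of `*f` read the same, the
frame constants `[R + 8, R + 28H)` read the same; the environment and the arena layer of the NEW memory are given (after a plain
store: `Env.eqOn`, `ArenaOK.frame`; after an allocator: its post), the block predicate only grows. -/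
theorem c6e_sdw_carry {len : Nat} {A A' : Arena × List Obj} {Blk Blk' : Block → Prop} {Live Live' : Nat → Prop} {mem mem' : Mem}
    {f R : Nat} (h : SDw len 3 A Blk Live mem f R) (hup : ∀ B, Blk B → Blk' B)
    (he : ObjEq c6e_keepWins mem f mem' f)
    (hst : Mem.EqOn (R + 8) (R + 0x28) mem mem') (hR : R + 0x28 ≤ 2 ^ 64)
    (henv : Env Blk' Live' mem') (harena : ArenaOK A'.1 A'.2 mem' f) (hset : ∀ B, A'.1.Blk B → Blk' B) :
    SDw len 3 A' Blk' Live' mem' f R := by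
  have hbits := h.bits
  refine
    { env := henv
      frame := h.frame.frame hst hR
      arena := harena
      setups := hset
      bits := ?bits
      first := ?first
      discard0 := ?discard
      header := ?header
      cb0 := ?cb0
      rest := ?rest }
  case bits =>
    apply hbits.transfer (he.sub (by decide)) ⟨hup _ hbits.OB1, hbits.OB1a⟩ hbits.OBR (hup _ hbits.S2)
  case first =>
    have h1 := h.first
    simp only [vacc, voff] at h1 ⊢
    rw [he.u8 1749 (by decide)]
    exact h1
  case discard =>
    have h1 := h.discard0
    simp only [vacc, voff] at h1 ⊢
    rw [he.i32 1784 (by decide)]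
    exact h1
  case header =>
    intro hk
    exact (h.header hk).transfer (he.sub (by decide))
  case cb0 =>
    intro hk
    obtain ⟨h1, h2⟩ := h.cb0 hk
    refine ⟨h1.transfer (he.sub (by decide)) (fun B _ hB => hup B hB), ?_⟩
    simp only [vacc, voff] at h2 ⊢
    rw [he.u64 168 (by decide)]
    exact h2
  case rest =>
    have h1 := h.rest
    unfold RestZero at h1 ⊢
    intro o ho1 ho2
    have hlo : 176 ≤ o := by
      have e : restFrom 3 = 176 := by
        simp only [restFrom, voff]
        decide
      omega
    have hhi : o < 1480 := by
      simp only [voff] at ho2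
      exact ho2
    have hm : ((144, 1808) : Nat × Nat) ∈ c6e_keepWins :=
      List.mem_cons_of_mem _ (List.mem_cons_of_mem _ List.mem_cons_self)
    rw [he (144, 1808) hm o (by simp only []; omega) (by simp only []; omega)]
    exact h1 o ho1 ho2

/-- **THE RECORD `BookTrans` OVER A CHANGE OF MEMORY THAT MAY WRITE INTO THE STRUCT `cb(i)` OF THE BOOK UNDER CONSTRUCTION**: the
windows `vendor … comment_list`, `codebook_count`, `codebooks` of `*f` read the same, every arena block but the codebooks block is
kept, and so is the struct of every OTHER book. (`BookTrans.store_book` is the instance "one `writeLE`"; a segment's walk yields a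
`SameExcept` of several stores and callee footprints: this is the form it can use.) -/
theorem c6e_bookTrans_carry {A2 A3 Ai A : Arena} {mem mem' : Mem} {f i : Nat}
    (h : BookTrans A2 A3 Ai A mem f i) (he : ObjEq BookTrans.wins mem f mem' f)
    (hk : ∀ B, A.Blk B → B ≠ codebooksBlock mem f → B.Kept mem mem')
    (hcb : ∀ j : Nat, j ≠ i → (j : Int) < stb_vorbis.codebook_count mem f →
      (Codebook.block (stb_vorbis.codebooks_at mem f j)).Kept mem mem') :
    BookTrans A2 A3 Ai A mem' f i := by
  have h3 : A3.Extends A := h.ext3.trans h.exti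
  apply h.frame he
  · intro B hR
    have hB : A2.Blk B := h.comment.reads_blk hR
    apply hk B ((h.up2 hB).mono h.exti)
    exact Since.ne_old hB h.F2
  · intro j hj
    have hn := h.n_le
    exact hcb j (by omega) (by omega)
  · intro j hj hse
    have hS : Since A3 Ai (Codebook.svBlock mem (stb_vorbis.codebooks_at mem f j)) := (h.books j hj).K4.sv hse
    apply hk _ (hS.1.mono h.exti)
    intro e
    exact Since.ne_old h.F2.1 hS e.symm

/-- **An arena block other than `C` is kept by a batch of stores each of which lies inside the arena block `C` or outside the
arena's buffer** (the stack, `*f` at start_decoder time): the `hk` of `c6e_bookTrans_carry` with `C` = the codebooks block. -/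
theorem c6e_blk_kept_of_spans {A : Arena} {others : List Obj} {mem mem' : Mem} {f : Nat} (ha : ArenaOK A others mem f)
    {ws : List Span} (hs : Mem.SameExcept ws mem mem') {C : Block} (hC : A.Blk C)
    (hw : ∀ w, w ∈ ws → (C.base ≤ w.lo ∧ w.hi ≤ C.base + C.size) ∨ w.hi ≤ A.B ∨ A.B + A.L ≤ w.lo)
    {B : Block} (hB : A.Blk B) (hne : B ≠ C) : B.Kept mem mem' := by
  have hd := arena_disjoint ha hB hC hne
  have hin := arena_inside ha hB
  have hb := ha.bounds
  simp only [vblock] at hd hin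
  apply Block.Kept.of_sameExcept hs
  · intro w hmem
    have := hw w hmem
    omega
  · omega

/-- **WHERE `*f` IS, RELATIVE TO THE OWN FRAME**: `*f` (an object of a CALLER's protected frame, or of `A.2`) lies above the
return-address slot, or off the stack region. (`LiveIn.where_` with `top = g.R` only gives `g.R ≤ g.f`, which does not separate
the stores into `*f` from the saved-register slots `[R + 598H, R + 5D0H)` that `Frame` reads.) -/
theorem c6e_obj_above {u₀ : State} {g : Ghost} {pc : Word} {A : Arena × List Obj} {v : State} (hfr : Frame u₀ g pc A v)
    (hh : g.Hand A) : g.RA + 8 ≤ g.f ∨ g.f + 1808 ≤ 0x700000 ∨ 0x800000 ≤ g.f := by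
  obtain ⟨o, ho, k1, k2⟩ := hh.obj
  have hra := hfr.ra
  simp only [voff] at k2
  rcases List.mem_append.mp ho with hs | hoth
  · unfold stackObjs at hs
    obtain ⟨bF, hbF, hin⟩ := List.mem_flatMap.mp hs
    have hbF' : bF ∈ g.frames' := List.mem_cons_of_mem _ hbF
    obtain ⟨a1, a2, _, _, _⟩ := hfr.shadow.stack.active bF hbF'
    have hg := FrameLayout.objsAt_gran a1 a2 hin
    have hc := hfr.callers bF hbF
    have e : o.gLo = o.base / 8 := rfl
    left
    omega
  · have := hfr.shadow.off o hoth
    unfold OffStack at this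
    omega

/-- **`Frame` AT ANOTHER CUT POINT, OVER A BATCH OF STORES** (`hs`: the walker's `SameExcept` since `v`): every span lies off the
upper part `[R, RA + 8)` of the own frame (`h1`), off the global `log2_4` (`h2`), and inside the function's footprint (`h3`); no
shadow byte was written (`hun`); rip, rsp, the code span and the ABI invariant of the new state are the walker's facts. -/
theorem c6e_frame_carry {u₀ : State} {g : Ghost} {pc pc' : Word} {A : Arena × List Obj} {v w : State} (hfr : Frame u₀ g pc A v)
    {ws : List Span} (hs : Mem.SameExcept ws v.mem w.mem)
    (h1 : ∀ s, s ∈ ws → s.hi ≤ g.R ∨ g.RA + 8 ≤ s.lo)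
    (h2 : ∀ s, s ∈ ws → s.hi ≤ 0x120640 ∨ 0x120650 ≤ s.lo)
    (h3 : ∀ s, s ∈ ws → s.hi ≤ s.lo ∨ InSpans (footprint g) s.lo (s.hi - s.lo))
    (hun : ShadowUntouched v.mem w.mem)
    (hrip : w.rip = pc') (hrsp : w.reg .rsp = addr g.R) (hcode : CodeOK u₀ w.mem) (hinv : abiInv w) :
    Frame u₀ g pc' A w := by
  have hra := hfr.ra
  have hreq := hfr.r_eq
  simp only [depth, steady] at hra hreq
  have heq : Mem.EqOn g.R (g.RA + 8) v.mem w.mem := by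
    apply hs.eqOn
    intro s hmem
    have := h1 s hmem
    omega
  have hlog : Mem.EqOn 0x120640 0x120650 v.mem w.mem := by
    apply hs.eqOn
    intro s hmem
    have := h2 s hmem
    omega
  refine
    { entry := hfr.entry
      rip := hrip
      rsp := hrsp
      shadowIdx := ?_
      saved_rbx := ?_
      saved_rbp := ?_
      saved_r12 := ?_
      saved_r13 := ?_
      saved_r14 := ?_
      saved_r15 := ?_
      saved_ra := ?_
      code := hcode
      inv := hinv
      shadow := hfr.shadow.untouched hun
      offText := hfr.offText
      ext := hfr.ext
      callers := hfr.callers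
      sh7 := ?_
      same := ?_ }
  · rw [heq.u64 _ (by omega) (by omega) (by omega)]
    exact hfr.shadowIdx
  · rw [heq.u64 _ (by omega) (by omega) (by omega)]
    exact hfr.saved_rbx
  · rw [heq.u64 _ (by omega) (by omega) (by omega)]
    exact hfr.saved_rbp
  · rw [heq.u64 _ (by omega) (by omega) (by omega)]
    exact hfr.saved_r12
  · rw [heq.u64 _ (by omega) (by omega) (by omega)]
    exact hfr.saved_r13
  · rw [heq.u64 _ (by omega) (by omega) (by omega)]
    exact hfr.saved_r14
  · rw [heq.u64 _ (by omega) (by omega) (by omega)]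
    exact hfr.saved_r15
  · rw [heq.u64 _ (by omega) (by omega) (by omega)]
    exact hfr.saved_ra
  · intro i hi
    have hb : Vorbis.Globals.log2_4.beg = 0x120640 := by decide
    have e : w.mem.readLE (UInt64.ofNat (Vorbis.Globals.log2_4.beg + i)) 1 = w.mem.u8 (Vorbis.Globals.log2_4.beg + i) := rfl
    have e' : v.mem.readLE (UInt64.ofNat (Vorbis.Globals.log2_4.beg + i)) 1 = v.mem.u8 (Vorbis.Globals.log2_4.beg + i) := rfl
    rw [e, hlog.u8 _ (by omega) (by omega) (by omega), ← e']
    exact hfr.sh7 i hi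
  · exact hfr.same.step_same' hs h3

/-- A span a segment of the codebook loop may write WITHOUT an allocator call: the own stack `[RA − 1888, R)`, the struct `cb(i)`, and the
windows `[8, 20)` (`setup_memory_required` … `setup_temp_memory_required`) and `[140, 144)` (`error`) of `*f`. -/
def c6e_SpanOK (g : Ghost) (c : Nat) (s : Span) : Prop :=
  (g.RA - 1888 ≤ s.lo ∧ s.hi ≤ g.R) ∨ (c ≤ s.lo ∧ s.hi ≤ c + 2120) ∨ (g.f + 8 ≤ s.lo ∧ s.hi ≤ g.f + 20) ∨
    (g.f + 140 ≤ s.lo ∧ s.hi ≤ g.f + 144)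

/-- The arithmetic of a point `Cur`: where `cb(i)`, the codebooks block, `*f`, the arena and the own frame are. -/
theorem c6e_cur_where {u₀ : State} {g : Ghost} {pc : Word} {i : Nat} {A2 A3 Ai : Arena} {A : Arena × List Obj} {v : State}
    (hfr : Frame u₀ g pc A v) (h : Cur g i A2 A3 Ai A v) :
    A.1.B ≤ stb_vorbis.codebooks v.mem g.f ∧
      stb_vorbis.codebooks v.mem g.f + 2120 * (stb_vorbis.codebook_count v.mem g.f).toNat ≤ A.1.B + A.1.L ∧
      (i : Int) < stb_vorbis.codebook_count v.mem g.f ∧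
      g.cb v.mem i = stb_vorbis.codebooks v.mem g.f + 2120 * i ∧
      A.1.B + A.1.L ≤ 0xC00000 ∧ 0x100000 ≤ A.1.B ∧ (A.1.B + A.1.L ≤ 0x700000 ∨ 0x800000 ≤ A.1.B) ∧
      (g.f + 1808 ≤ A.1.B ∨ A.1.B + A.1.L ≤ g.f) ∧
      (g.RA + 8 ≤ g.f ∨ g.f + 1808 ≤ 0x700000 ∨ 0x800000 ≤ g.f) ∧ g.f + 1808 ≤ 0xC00000 ∧
      g.R + 1480 = g.RA ∧ 0x700000 + 1888 ≤ g.RA ∧ g.RA + 8 ≤ 0x800000 := by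
  have harena := h.sd.arena
  have hcbA : A.1.Blk (codebooksBlock v.mem g.f) := (h.ages.F2.1.mono h.ages.ext3).mono h.ages.exti
  have hcbin := arena_inside harena hcbA
  have hab := harena.AR1
  have hax := harena.AR1x
  have hout := h.hand.objOut
  have habove := c6e_obj_above hfr h.hand
  have hra := hfr.ra
  have hreq := hfr.r_eq
  have hobr := h.sd.bits.OBR
  have hlt := h.lt
  simp only [vblock, voff, depth, steady] at hcbin hout hra hreq hobr
  refine ⟨hcbin.1, hcbin.2, hlt, ?_, hab.2.2.2, hax.1, hax.2, hout, habove, hobr.2, hreq.1, hra.2.1, hra.2.2⟩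
  unfold Ghost.cb
  simp only [vacc, voff]

/-- **CUR(i) OVER A BATCH OF STORES WITHOUT AN ALLOCATOR CALL** (`hs`: the walker's `SameExcept` since `v`, every span `c6e_SpanOK`; no
shadow byte written; r14 unchanged): the point `Cur` for the new state, same ghost arena and snapshots. -/
theorem c6e_cur_carry {u₀ : State} {g : Ghost} {pc : Word} {i : Nat} {A2 A3 Ai : Arena} {A : Arena × List Obj} {v w : State}
    (hfr : Frame u₀ g pc A v) (h : Cur g i A2 A3 Ai A v) {ws : List Span} (hs : Mem.SameExcept ws v.mem w.mem)
    (hw : ∀ s, s ∈ ws → c6e_SpanOK g (g.cb v.mem i) s) (hun : ShadowUntouched v.mem w.mem)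
    (hr14 : w.reg .r14 = v.reg .r14) : Cur g i A2 A3 Ai A w := by
  obtain ⟨k1, k2, k3, k4, k5, k6, k7, k8, k9, k10, k11, k12, k13⟩ := c6e_cur_where hfr h
  have harena := h.sd.arena
  have hcbA : A.1.Blk (codebooksBlock v.mem g.f) := (h.ages.F2.1.mono h.ages.ext3).mono h.ages.exti
  have hcnt : (i : Nat) < (stb_vorbis.codebook_count v.mem g.f).toNat := by omega
  have hmul : 2120 * (i + 1) ≤ 2120 * (stb_vorbis.codebook_count v.mem g.f).toNat := Nat.mul_le_mul_left 2120 hcnt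
  generalize hc : g.cb v.mem i = c at *
  generalize hN : (stb_vorbis.codebook_count v.mem g.f).toNat = N at *
  generalize hcbs : stb_vorbis.codebooks v.mem g.f = cbs at *
  -- the windows of `*f`
  have he : ObjEq c6e_keepWins v.mem g.f w.mem g.f := by
    apply ObjEq.of_sameExcept hs
    · intro x hx
      simp only [c6e_keepWins, List.mem_cons, List.mem_nil_iff, or_false] at hx
      rcases hx with rfl | rfl | rfl <;> simp only [] <;> omega
    · intro x hx s hmem
      have hso := hw s hmem
      unfold c6e_SpanOK at hso
      simp only [c6e_keepWins, List.mem_cons, List.mem_nil_iff, or_false] at hx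
      rcases hx with rfl | rfl | rfl <;> simp only [] <;> omega
  -- the frame constants and the two slots
  have hst : Mem.EqOn (g.R + 8) (g.R + 0x38) v.mem w.mem := by
    apply hs.eqOn
    intro s hmem
    have hso := hw s hmem
    unfold c6e_SpanOK at hso
    omega
  -- the arena fields
  have har : Mem.EqOn (g.f + 112) (g.f + 136) v.mem w.mem := by
    apply hs.eqOn
    intro s hmem
    have hso := hw s hmem
    unfold c6e_SpanOK at hso
    omega
  have harena' : ArenaOK A.1 A.2 w.mem g.f := by
    apply harena.frame (by simp only [voff]; omega)
    simp only [voff]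
    exact har
  have hsd : SDw g.len 3 A (g.Blk A) (g.Live A) w.mem g.f g.R :=
    c6e_sdw_carry h.sd (fun _ hB => hB) he (hst.mono (by omega) (by omega)) (by omega) (h.sd.env.eqOn hun) harena' h.sd.setups
  -- the reads of `*f` the other clauses use
  have ecnt : stb_vorbis.codebook_count w.mem g.f = stb_vorbis.codebook_count v.mem g.f := by
    simp only [vacc, voff]
    exact he.i32 160 (by decide)
  have ecbs : stb_vorbis.codebooks w.mem g.f = stb_vorbis.codebooks v.mem g.f := by
    simp only [vacc, voff]
    exact he.u64 168 (by decide)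
  have ecb : g.cb w.mem i = g.cb v.mem i := by
    unfold Ghost.cb
    simp only [stb_vorbis.codebooks_at]
    rw [ecbs]
  -- the record
  have hages : BookTrans A2 A3 Ai A.1 w.mem g.f i := by
    apply c6e_bookTrans_carry h.ages (he.sub (by decide))
    · intro B hB hne
      apply c6e_blk_kept_of_spans harena hs hcbA ?_ hB hne
      intro s hmem
      have hso := hw s hmem
      unfold c6e_SpanOK at hso
      simp only [hcbs, hN, voff]
      omega
    · intro j hj hjlt
      have hjN : j < N := by omega
      have hmj : 2120 * (j + 1) ≤ 2120 * N := Nat.mul_le_mul_left 2120 hjN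
      apply Block.Kept.of_sameExcept hs
      · intro s hmem
        have hso := hw s hmem
        unfold c6e_SpanOK at hso
        simp only [stb_vorbis.codebooks_at, hcbs, voff]
        rcases Nat.lt_or_gt_of_ne hj with hlt | hgt
        · have : 2120 * (j + 1) ≤ 2120 * i := Nat.mul_le_mul_left 2120 hlt
          omega
        · have : 2120 * (i + 1) ≤ 2120 * j := Nat.mul_le_mul_left 2120 hgt
          omega
      · simp only [stb_vorbis.codebooks_at, hcbs, voff]
        omega
  refine
    { sd := hsd
      hand := h.hand
      ages := hages
      zf := ?_
      lt := ?_
      slot_f := ?_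
      slot_i := ?_
      r14 := ?_ }
  · rw [ecnt, ecbs, hN, hcbs]
    have hz := h.zf
    rw [hN, hcbs] at hz
    apply hz.same
    · apply hs.eqOn
      intro s hmem
      have hso := hw s hmem
      unfold c6e_SpanOK at hso
      simp only [voff]
      omega
    · omega
    · simp only [voff]
      omega
  · rw [ecnt]
    exact k3
  · rw [hst.u64 _ (by omega) (by omega) (by omega)]
    exact h.slot_f
  · rw [hst.u32 _ (by omega) (by omega) (by omega)]
    exact h.slot_i
  · rw [hr14, ecb, hc]
    have := h.r14
    rw [hc] at this
    exact this

/-- The global `log2_4` (a live object of kind `global`) lies outside the arena's buffer (AR6x): a store into an arena block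
keeps `Frame.sh7`. -/
theorem c6e_arena_off_log2 {len f : Nat} {frames : List (Nat × FrameLayout)} {A : Arena × List Obj} {mem : Mem} {p : Nat}
    (hh : HandOK len f frames A) (ha : ArenaOK A.1 A.2 mem p) : 0x120650 ≤ A.1.B ∨ A.1.B + A.1.L ≤ 0x120640 := by
  have hg := hh.toHand.g_log2
  rcases ha.AR6x _ hg with hin | ⟨_, _, hout⟩
  · exfalso
    rcases Arena.mem_objs hin with ⟨b, _, e⟩ | ⟨b, _, e⟩
    · have hk := congrArg Obj.kind e
      cases hk
    · have hk := congrArg Obj.kind e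
      cases hk
  · have e1 : Vorbis.Globals.log2_4.obj.base = 0x120640 := rfl
    have e2 : Vorbis.Globals.log2_4.obj.size = 16 := rfl
    omega

/-- **`Frame`, CUR(i) AND THE STRUCT'S ADDRESS OVER A BATCH OF STORES WITHOUT AN ALLOCATOR CALL** (`hs`: the walker's `SameExcept` since
`v`, every span `c6e_SpanOK`: the own stack, the struct `cb(i)`, `[f + 8, f + 20)` — the `size` statistic store 0x1146ce of C6e —,
`[f + 140, f + 144)`; no shadow byte written; r14 unchanged): `Frame` at the new program counter, CUR(i) with the same ghost, and
`cb(i)` is the same address (`f->codebooks` is not in a window). -/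
theorem c6e_carry {u₀ : State} {g : Ghost} {pc pc' : Word} {i : Nat} {A2 A3 Ai : Arena} {A : Arena × List Obj} {v w : State}
    (hfr : Frame u₀ g pc A v) (h : Cur g i A2 A3 Ai A v) {ws : List Span} (hs : Mem.SameExcept ws v.mem w.mem)
    (hw : ∀ s, s ∈ ws → c6e_SpanOK g (g.cb v.mem i) s) (hun : ShadowUntouched v.mem w.mem)
    (hrip : w.rip = pc') (hrsp : w.reg .rsp = addr g.R) (hcode : CodeOK u₀ w.mem)
    (hinv : abiInv w) (hr14 : w.reg .r14 = v.reg .r14) :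
    Frame u₀ g pc' A w ∧ Cur g i A2 A3 Ai A w ∧ g.cb w.mem i = g.cb v.mem i := by
  obtain ⟨k1, k2, k3, k4, k5, k6, k7, k8, k9, k10, k11, k12, k13⟩ := c6e_cur_where hfr h
  have hlog := c6e_arena_off_log2 h.hand h.sd.arena
  have hobr := h.sd.bits.OBR.1
  have hcnt : (i : Nat) < (stb_vorbis.codebook_count v.mem g.f).toNat := by omega
  have hmul : 2120 * (i + 1) ≤ 2120 * (stb_vorbis.codebook_count v.mem g.f).toNat := Nat.mul_le_mul_left 2120 hcnt
  have hcur := c6e_cur_carry hfr h hs hw hun hr14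
  have hcbs : Mem.EqOn (g.f + 168) (g.f + 176) v.mem w.mem := by
    apply hs.eqOn
    intro s hmem
    have hso := hw s hmem
    unfold c6e_SpanOK at hso
    omega
  have ecb : g.cb w.mem i = g.cb v.mem i := by
    unfold Ghost.cb
    simp only [stb_vorbis.codebooks_at, vacc, voff]
    rw [hcbs.u64 _ (by omega) (by omega) (by omega)]
  generalize hc : g.cb v.mem i = c at *
  have hfr' : Frame u₀ g pc' A w := by
    apply c6e_frame_carry hfr hs ?_ ?_ ?_ hun hrip hrsp hcode hinv
    · intro s hmem
      have hso := hw s hmem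
      unfold c6e_SpanOK at hso
      omega
    · intro s hmem
      have hso := hw s hmem
      unfold c6e_SpanOK at hso
      omega
    · intro s hmem
      have hso := hw s hmem
      unfold c6e_SpanOK at hso
      by_cases hemp : s.hi ≤ s.lo
      · exact Or.inl hemp
      · right
        have hA0 := hfr.ext
        have eB : g.A0.1.B = A.1.B := hA0.B.symm
        have eL : g.A0.1.L = A.1.L := hA0.L.symm
        have eRA : g.RA = (g.e.reg .rsp).toNat := rfl
        have ef : g.f = (g.e.reg .rdi).toNat := rfl
        simp only [footprint, writes, depth, X86.User.inSpans_cons, X86.User.inSpans_nil, or_false, vblock, voff, eB, eL,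
          ← eRA, ← ef]
        omega
  exact ⟨hfr', hcur, ecb⟩

end Vorbis.Spec.start_decoder_C6e
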